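-- pv_equiv track=rewrite | github.com/luigidino33/ygo-tcg-ph-swiss-maker | api/index.py | _build_brackets
-- ===== SOURCE A (Python) =====
-- def _build_brackets(ids: list[str], pts_by_id: dict, kts_by_id: dict, id2name: dict) -> list[list[str]]:
--   from collections import defaultdict
--   buckets = defaultdict(list)
--   for pid in ids:
--     buckets[pts_by_id.get(pid, 0)].append(pid)
--   brackets = []
--   for pts in sorted(buckets.keys(), reverse=True):
--     bucket = buckets[pts]
--     bucket.sort(key=lambda pid: (-kts_by_id.get(pid, 0), id2name[pid]))
--     brackets.append(bucket)
--   return brackets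
-- ===== SOURCE B (Python) =====
-- def _build_brackets(ids: list[str], pts_by_id: dict, kts_by_id: dict, id2name: dict) -> list[list[str]]:
--   from itertools import groupby
--   ordered = sorted(ids, key=lambda pid: (-kts_by_id.get(pid, 0), id2name[pid]))
--   ordered = sorted(ordered, key=lambda pid: -pts_by_id.get(pid, 0))
--   return [list(g) for _, g in groupby(ordered, key=lambda pid: pts_by_id.get(pid, 0))]
-- ===== Notes on version B (the rewrite author's own statement) =====
-- stated objective: simpler
-- what changed: B has no bucket dict at all: it sorts the whole id list once by the tiebreakers and stably re-sorts it by descending points (equivalent to one composite-key sort), then slices that single ordered list into brackets with itertools.groupby on the points value.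
import Mathlib
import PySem

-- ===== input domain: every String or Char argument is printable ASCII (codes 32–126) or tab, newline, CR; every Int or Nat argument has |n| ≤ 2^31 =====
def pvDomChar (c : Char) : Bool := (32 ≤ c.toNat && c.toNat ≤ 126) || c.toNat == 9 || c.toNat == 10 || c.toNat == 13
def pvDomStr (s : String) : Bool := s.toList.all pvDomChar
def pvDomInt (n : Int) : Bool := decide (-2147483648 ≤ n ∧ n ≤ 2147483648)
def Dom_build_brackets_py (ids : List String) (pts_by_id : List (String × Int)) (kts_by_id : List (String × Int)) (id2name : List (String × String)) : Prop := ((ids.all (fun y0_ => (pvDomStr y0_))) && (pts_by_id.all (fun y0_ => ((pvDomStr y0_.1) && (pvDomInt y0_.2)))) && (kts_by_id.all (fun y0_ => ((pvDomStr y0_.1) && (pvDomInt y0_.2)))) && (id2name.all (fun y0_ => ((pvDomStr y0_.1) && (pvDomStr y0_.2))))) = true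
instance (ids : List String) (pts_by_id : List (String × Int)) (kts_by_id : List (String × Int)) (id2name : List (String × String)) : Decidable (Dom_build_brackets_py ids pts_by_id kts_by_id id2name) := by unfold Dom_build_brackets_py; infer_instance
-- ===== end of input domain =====

-- B drops A's bucket dict entirely: one list, stably sorted by tiebreakers then by descending
-- points, is sliced into brackets by grouping consecutive equal-points runs (objective: simpler).


-- ===== PORT A =====
-- A: bucket ids by points in a defaultdict, then for each points value in descending
-- order sort its bucket by (-kts, name) and append it.
-- id2name[pid] (a raising lookup) is ported as nameD.getD pid "": exact under
-- Pre_build_brackets_py, which excludes the KeyError inputs.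
def build_brackets_py (ids : List String) (pts_by_id : List (String × Int)) (kts_by_id : List (String × Int)) (id2name : List (String × String)) : List (List String) :=
  let ptsD : PySem.Dict String Int := PySem.Dict.ofList pts_by_id
  let ktsD : PySem.Dict String Int := PySem.Dict.ofList kts_by_id
  let nameD : PySem.Dict String String := PySem.Dict.ofList id2name
  -- for pid in ids: buckets[pts_by_id.get(pid, 0)].append(pid)
  let buckets : PySem.Dict Int (List String) :=
    ids.foldl (fun d pid => d.modify (ptsD.getD pid 0) [] (fun b => b ++ [pid])) PySem.Dict.empty
  -- for pts in sorted(buckets.keys(), reverse=True): bucket.sort(key=…); brackets.append(bucket)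
  (PySem.List.sorted buckets.keys (fun v => v) true).foldl
    (fun brackets pts =>
      brackets ++ [PySem.List.sorted2 (buckets.getD pts [])
        (fun pid => -(ktsD.getD pid 0)) (fun pid => nameD.getD pid "") false]) []

-- ===== PORT B =====
-- B: ordered = sorted(ids, key=(-kts, name)); ordered = sorted(ordered, key=-pts)
--    (two stable sorts = one composite-key sort); then one bracket per consecutive
--    run of equal points: [list(g) for _, g in groupby(ordered, key=pts)].
-- groupby+list(g) is ported by hand as groupRuns: the maximal consecutive runs of
-- equal key value, left to right (exact for groupby on a list, each group materialized).
def groupRuns (k : String → Int) : List String → List (List String)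
  | [] => []
  | x :: xs =>
      (x :: xs.takeWhile (fun y => k y == k x)) :: groupRuns k (xs.dropWhile (fun y => k y == k x))
termination_by l => l.length
decreasing_by simp only [List.length_cons]; exact Nat.lt_succ_of_le (List.length_dropWhile_le _ _)

def build_brackets_py_alt (ids : List String) (pts_by_id : List (String × Int)) (kts_by_id : List (String × Int)) (id2name : List (String × String)) : List (List String) :=
  let ptsD : PySem.Dict String Int := PySem.Dict.ofList pts_by_id
  let ktsD : PySem.Dict String Int := PySem.Dict.ofList kts_by_id
  let nameD : PySem.Dict String String := PySem.Dict.ofList id2name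
  let ordered1 := PySem.List.sorted2 ids (fun pid => -(ktsD.getD pid 0)) (fun pid => nameD.getD pid "") false
  let ordered2 := PySem.List.sorted ordered1 (fun pid => -(ptsD.getD pid 0)) false
  groupRuns (fun pid => ptsD.getD pid 0) ordered2

-- ===== PRECONDITION & SPEC =====
-- A (and B) raise KeyError via id2name[pid] when some id has no name; exactly those inputs are excluded.
def Pre_build_brackets_py (ids : List String) (pts_by_id : List (String × Int)) (kts_by_id : List (String × Int)) (id2name : List (String × String)) : Prop :=
  ∀ pid ∈ ids, pid ∈ id2name.map Prod.fst
instance (ids : List String) (pts_by_id : List (String × Int)) (kts_by_id : List (String × Int)) (id2name : List (String × String)) : Decidable (Pre_build_brackets_py ids pts_by_id kts_by_id id2name) := by unfold Pre_build_brackets_py; infer_instance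

def pvWitness_build_brackets_py : List String × (List (String × Int)) × (List (String × Int)) × (List (String × String)) :=
  (["a", "b", "c"], [("a", 3), ("b", 3)], [("a", 1)], [("a", "Al"), ("b", "Bo"), ("c", "Cy")])

def Spec_build_brackets_py (ids : List String) (pts_by_id : List (String × Int)) (kts_by_id : List (String × Int)) (id2name : List (String × String)) (out : List (List String)) : Prop := out = build_brackets_py_alt ids pts_by_id kts_by_id id2name
instance (ids : List String) (pts_by_id : List (String × Int)) (kts_by_id : List (String × Int)) (id2name : List (String × String)) (out : List (List String)) : Decidable (Spec_build_brackets_py ids pts_by_id kts_by_id id2name out) := by unfold Spec_build_brackets_py; infer_instance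

-- ===== CLAIM (what is proved, stated in full; the proofs are below) =====
def Claim_equal_build_brackets_py : Prop := ∀ (ids : List String) (pts_by_id : List (String × Int)) (kts_by_id : List (String × Int)) (id2name : List (String × String)), Dom_build_brackets_py ids pts_by_id kts_by_id id2name → Pre_build_brackets_py ids pts_by_id kts_by_id id2name → Spec_build_brackets_py ids pts_by_id kts_by_id id2name (build_brackets_py ids pts_by_id kts_by_id id2name)

-- ===== LEMMAS AND PROOFS =====

-- Insertion sort by an abstract comparator (both PySem sorts are this fold).
def sortB {α : Type} (b : α → α → Bool) (xs : List α) : List α :=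
  xs.foldl (fun acc x => PySem.List.insertBy b x acc) []

-- the tuple-key comparator of PySem.List.sorted2
def lt2 {α κ₁ κ₂ : Type} [LinearOrder κ₁] [LinearOrder κ₂] (k1 : α → κ₁) (k2 : α → κ₂) (a c : α) : Bool :=
  decide (k1 a < k1 c) || (!decide (k1 c < k1 a) && decide (k2 a < k2 c))

theorem sorted2_eq_sortB {α κ₁ κ₂ : Type} [LinearOrder κ₁] [LinearOrder κ₂] (xs : List α) (k1 : α → κ₁) (k2 : α → κ₂) :
    PySem.List.sorted2 xs k1 k2 false = sortB (lt2 k1 k2) xs := rfl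

theorem sorted_eq_sortB {α κ : Type} [LinearOrder κ] (xs : List α) (key : α → κ) :
    PySem.List.sorted xs key false = sortB (fun a c => decide (key a < key c)) xs := rfl

theorem sortB_append_singleton {α : Type} (b : α → α → Bool) (xs : List α) (x : α) :
    sortB b (xs ++ [x]) = PySem.List.insertBy b x (sortB b xs) := by
  simp [sortB]

theorem mem_sortB {α : Type} (b : α → α → Bool) (xs : List α) (z : α) :
    z ∈ sortB b xs ↔ z ∈ xs := by
  induction xs using List.reverseRecOn with
  | nil => simp [sortB]
  | append_singleton xs x ih =>
      rw [sortB_append_singleton]; simp [PySem.List.mem_insertBy, ih]; tauto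
theorem insertBy_cons_pos {α : Type} (b : α → α → Bool) (x y : α) (l : List α) (h : b x y = true) :
    PySem.List.insertBy b x (y :: l) = x :: y :: l := by simp [PySem.List.insertBy, h]
theorem insertBy_cons_neg {α : Type} (b : α → α → Bool) (x y : α) (l : List α) (h : b x y = false) :
    PySem.List.insertBy b x (y :: l) = y :: PySem.List.insertBy b x l := by simp [PySem.List.insertBy, h]
theorem insertBy_app_left {α : Type} (b : α → α → Bool) (x : α) (l₁ l₂ : List α)
    (h : ∀ y ∈ l₁, b x y = false) :
    PySem.List.insertBy b x (l₁ ++ l₂) = l₁ ++ PySem.List.insertBy b x l₂ := by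
  induction l₁ with
  | nil => simp
  | cons y t ih =>
      rw [List.cons_append, insertBy_cons_neg b x y _ (h y (by simp)), ih (fun y hy => h y (by simp [hy]))]
      simp
theorem insertBy_app_right {α : Type} (b : α → α → Bool) (x : α) (l₁ l₂ : List α)
    (h : ∀ y ∈ l₂, b x y = true) :
    PySem.List.insertBy b x (l₁ ++ l₂) = PySem.List.insertBy b x l₁ ++ l₂ := by
  induction l₁ with
  | nil =>
      cases l₂ with
      | nil => simp
      | cons z t => simp [insertBy_cons_pos b x z t (h z (by simp)), PySem.List.insertBy]
  | cons y t ih =>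
      cases hxy : b x y with
      | true =>
          rw [List.cons_append, insertBy_cons_pos b x y _ hxy, insertBy_cons_pos b x y t hxy]
          simp
      | false =>
          rw [List.cons_append, insertBy_cons_neg b x y _ hxy, insertBy_cons_neg b x y t hxy, ih]
          simp
-- comparator facts used by the stability argument
def Asym {α : Type} (b : α → α → Bool) : Prop := ∀ x y, b x y = true → b y x = false
def TransB {α : Type} (b : α → α → Bool) : Prop := ∀ x y z, b x y = true → b z y = false → b x z = true

theorem lt2_iff {α κ₁ κ₂ : Type} [LinearOrder κ₁] [LinearOrder κ₂] (k1 : α → κ₁) (k2 : α → κ₂) (a c : α) :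
    lt2 k1 k2 a c = true ↔ (k1 a < k1 c ∨ (¬ k1 c < k1 a ∧ k2 a < k2 c)) := by
  simp [lt2]

theorem lt2_asym {α κ₁ κ₂ : Type} [LinearOrder κ₁] [LinearOrder κ₂] (k1 : α → κ₁) (k2 : α → κ₂) :
    Asym (lt2 k1 k2) := by
  intro x y h
  rw [lt2_iff] at h
  rw [← Bool.not_eq_true, lt2_iff]
  rcases h with h1 | ⟨h1, h2⟩
  · rintro (h' | ⟨h', h''⟩)
    · exact lt_asymm h1 h'
    · exact h' h1
  · rintro (h' | ⟨h', h''⟩)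
    · exact h1 h'
    · exact lt_asymm h2 h''
theorem lt2_transB {α κ₁ κ₂ : Type} [LinearOrder κ₁] [LinearOrder κ₂] (k1 : α → κ₁) (k2 : α → κ₂) :
    TransB (lt2 k1 k2) := by
  intro x y z h hzy
  rw [lt2_iff] at h ⊢
  rw [← Bool.not_eq_true, lt2_iff] at hzy
  push Not at hzy
  rcases h with h1 | ⟨h1, h2⟩
  · exact Or.inl (lt_of_lt_of_le h1 hzy.1)
  · rcases lt_or_ge (k1 y) (k1 z) with hb | hb
    · exact Or.inl (lt_of_le_of_lt (le_of_not_gt h1) hb)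
    · have h2' := hzy.2 hb
      refine Or.inr ⟨?_, lt_of_lt_of_le h2 h2'⟩
      intro hca
      exact h1 (lt_of_le_of_lt hzy.1 hca)
-- "no later element wants to precede an earlier one": the invariant of insertion sort
def InvOrd {α : Type} (b : α → α → Bool) (l : List α) : Prop := l.Pairwise (fun y z => b z y = false)

theorem invOrd_insertBy {α : Type} (b : α → α → Bool) (x : α) (l : List α)
    (hA : Asym b) (hT : TransB b) (hl : InvOrd b l) : InvOrd b (PySem.List.insertBy b x l) := by
  induction l with
  | nil => simp [PySem.List.insertBy, InvOrd]
  | cons y t ih =>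
      rw [InvOrd, List.pairwise_cons] at hl
      cases hxy : b x y with
      | true =>
          rw [insertBy_cons_pos b x y t hxy]
          rw [InvOrd]; refine List.Pairwise.cons ?_ (List.Pairwise.cons hl.1 hl.2)
          intro z hz
          rcases List.mem_cons.mp hz with rfl | hz
          · exact hA x z hxy
          · exact hA x z (hT x y z hxy (hl.1 z hz))
      | false =>
          rw [insertBy_cons_neg b x y t hxy]
          rw [InvOrd]; refine List.Pairwise.cons ?_ (ih hl.2)
          intro z hz
          rcases (PySem.List.mem_insertBy b x z t).mp hz with rfl | hz
          · exact hxy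
          · exact hl.1 z hz
theorem invOrd_sortB {α : Type} (b : α → α → Bool) (xs : List α)
    (hA : Asym b) (hT : TransB b) : InvOrd b (sortB b xs) := by
  induction xs using List.reverseRecOn with
  | nil => simp [sortB, InvOrd]
  | append_singleton xs x ih =>
      rw [sortB_append_singleton]; exact invOrd_insertBy b x _ hA hT ih
theorem filter_insertBy_neg {α : Type} (b : α → α → Bool) (p : α → Bool) (x : α) (l : List α)
    (hx : p x = false) :
    (PySem.List.insertBy b x l).filter p = l.filter p := by
  induction l with
  | nil => simp [PySem.List.insertBy, hx]
  | cons y t ih =>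
      cases hxy : b x y with
      | true => rw [insertBy_cons_pos b x y t hxy]; simp [hx]
      | false => rw [insertBy_cons_neg b x y t hxy]; simp [List.filter_cons, ih]
theorem insertBy_all_pos {α : Type} (b : α → α → Bool) (x : α) (m : List α)
    (h : ∀ z ∈ m, b x z = true) : PySem.List.insertBy b x m = x :: m := by
  cases m with
  | nil => simp [PySem.List.insertBy]
  | cons z t => exact insertBy_cons_pos b x z t (h z (by simp))

theorem filter_insertBy_pos {α : Type} (b : α → α → Bool) (p : α → Bool) (x : α) (l : List α)
    (hT : TransB b) (hl : InvOrd b l) (hx : p x = true) :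
    (PySem.List.insertBy b x l).filter p = PySem.List.insertBy b x (l.filter p) := by
  induction l with
  | nil => simp [PySem.List.insertBy, hx]
  | cons y t ih =>
      rw [InvOrd, List.pairwise_cons] at hl
      cases hxy : b x y with
      | true =>
          rw [insertBy_cons_pos b x y t hxy]
          cases hpy : p y with
          | true =>
              rw [List.filter_cons_of_pos hx, List.filter_cons_of_pos hpy,
                insertBy_cons_pos b x y _ hxy]
          | false =>
              rw [List.filter_cons_of_pos hx, List.filter_cons_of_neg (by simp [hpy]),
                insertBy_all_pos b x _ (fun z hz => hT x y z hxy (hl.1 z (List.mem_of_mem_filter hz)))]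
      | false =>
          rw [insertBy_cons_neg b x y t hxy]
          cases hpy : p y with
          | true =>
              rw [List.filter_cons_of_pos hpy, List.filter_cons_of_pos hpy,
                insertBy_cons_neg b x y _ hxy, ih hl.2]
          | false =>
              rw [List.filter_cons_of_neg (by simp [hpy]), List.filter_cons_of_neg (by simp [hpy]),
                ih hl.2]
-- STABILITY: filtering commutes with a stable sort.
theorem filter_sortB {α : Type} (b : α → α → Bool) (p : α → Bool) (xs : List α)
    (hA : Asym b) (hT : TransB b) :
    (sortB b xs).filter p = sortB b (xs.filter p) := by
  induction xs using List.reverseRecOn with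
  | nil => simp [sortB]
  | append_singleton xs x ih =>
      rw [sortB_append_singleton]
      cases hx : p x with
      | true =>
          rw [filter_insertBy_pos b p x _ hT (invOrd_sortB b xs hA hT) hx, ih,
            List.filter_append, List.filter_cons, hx]
          simp [sortB_append_singleton]
      | false =>
          rw [filter_insertBy_neg b p x _ hx, ih, List.filter_append, List.filter_cons, hx]
          simp
-- splitting a sort at a class boundary
theorem sortB_split {α : Type} (b : α → α → Bool) (p : α → Bool) (xs : List α)
    (hcl : ∀ x ∈ xs, ∀ y ∈ xs, p x = true → p y = false → b x y = true ∧ b y x = false) :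
    sortB b xs = sortB b (xs.filter p) ++ sortB b (xs.filter (fun a => !p a)) := by
  induction xs using List.reverseRecOn with
  | nil => simp [sortB]
  | append_singleton xs x ih =>
      have hcl' : ∀ x' ∈ xs, ∀ y ∈ xs, p x' = true → p y = false → b x' y = true ∧ b y x' = false :=
        fun a ha c hc => hcl a (by simp [ha]) c (by simp [hc])
      rw [sortB_append_singleton, ih hcl']
      cases hx : p x with
      | true =>
          rw [insertBy_app_right b x _ _ (by
            intro y hy
            rcases List.mem_filter.mp ((mem_sortB _ _ _).mp hy) with ⟨hy1, hy2⟩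
            exact (hcl x (by simp) y (by simp [hy1]) hx (by simpa using hy2)).1)]
          rw [List.filter_append, List.filter_append, List.filter_cons, List.filter_cons, hx]
          simp [sortB_append_singleton]
      | false =>
          rw [insertBy_app_left b x _ _ (by
            intro y hy
            rcases List.mem_filter.mp ((mem_sortB _ _ _).mp hy) with ⟨hy1, hy2⟩
            exact (hcl y (by simp [hy1]) x (by simp) hy2 hx).2)]
          rw [List.filter_append, List.filter_append, List.filter_cons, List.filter_cons, hx]
          simp [sortB_append_singleton]
theorem sortB_of_all_false {α : Type} (b : α → α → Bool) (l : List α)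
    (h : ∀ x ∈ l, ∀ y ∈ l, b x y = false) : sortB b l = l := by
  induction l using List.reverseRecOn with
  | nil => simp [sortB]
  | append_singleton l x ih =>
      rw [sortB_append_singleton,
        PySem.List.insertBy_of_forall_not_before b x _ (by
          intro y hy
          exact h x (by simp) y (by simp [(mem_sortB _ _ _).mp hy])),
        ih (fun a ha c hc => h a (by simp [ha]) c (by simp [hc]))]
-- a list sorted by descending points is the concatenation of its points-buckets
theorem bucketize (kp : String → Int) (V : List Int) (ys : List String)
    (hV : V.Pairwise (· > ·)) (hcov : ∀ x ∈ ys, kp x ∈ V) :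
    sortB (fun a c => decide (-(kp a) < -(kp c))) ys
      = V.flatMap (fun p => ys.filter (fun x => kp x == p)) := by
  induction V generalizing ys with
  | nil =>
      have hys : ys = [] := List.eq_nil_iff_forall_not_mem.mpr (fun x hx => by simpa using hcov x hx)
      subst hys; simp [sortB]
  | cons v V' ih =>
      rw [List.pairwise_cons] at hV
      rw [sortB_split _ (fun x => kp x == v) ys (by
        intro x hx y hy hpx hpy
        have hx' : kp x = v := by simpa using hpx
        have hy' : kp y ≠ v := by simpa using hpy
        have hyV' : kp y ∈ V' := by
          rcases List.mem_cons.mp (hcov y hy) with h | h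
          · exact absurd h hy'
          · exact h
        have hlt : kp y < kp x := hx' ▸ hV.1 _ hyV'
        exact ⟨by simp; omega, by simp; omega⟩)]
      rw [sortB_of_all_false _ _ (by
        intro x hx y hy
        have hx' : kp x = v := by simpa using (List.mem_filter.mp hx).2
        have hy' : kp y = v := by simpa using (List.mem_filter.mp hy).2
        simp; omega)]
      rw [ih (ys.filter (fun a => !(kp a == v))) hV.2 (by
        intro x hx
        rcases List.mem_filter.mp hx with ⟨hx1, hx2⟩
        have hx' : kp x ≠ v := by simpa using hx2
        rcases List.mem_cons.mp (hcov x hx1) with h | h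
        · exact absurd h hx'
        · exact h)]
      rw [List.flatMap_cons]
      congr 1
      rw [List.flatMap_def, List.flatMap_def]
      refine congrArg List.flatten (List.map_congr_left ?_)
      intro p hp
      have hpv : p ≠ v := fun h => absurd (h ▸ hV.1 p hp) (lt_irrefl v)
      rw [List.filter_filter]
      refine List.filter_congr ?_
      intro a _
      by_cases h : kp a = p
      · simp [h, hpv]
      · simp [h]

theorem takeWhile_all_append (q : String → Bool) (t r : List String)
    (h : ∀ y ∈ t, q y = true) : (t ++ r).takeWhile q = t ++ r.takeWhile q := by
  induction t with
  | nil => simp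
  | cons y t ih =>
      rw [List.cons_append, List.takeWhile_cons_of_pos (h y (by simp)),
        ih (fun z hz => h z (by simp [hz]))]
      simp

theorem dropWhile_all_append (q : String → Bool) (t r : List String)
    (h : ∀ y ∈ t, q y = true) : (t ++ r).dropWhile q = r.dropWhile q := by
  induction t with
  | nil => simp
  | cons y t ih =>
      rw [List.cons_append, List.dropWhile_cons_of_pos (h y (by simp)),
        ih (fun z hz => h z (by simp [hz]))]

-- grouping consecutive runs of a flatMap of nonempty constant-key blocks gives back the blocks
theorem groupRuns_flatMap (kp : String → Int) (V : List Int) (f : Int → List String)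
    (hne : ∀ v ∈ V, f v ≠ []) (hconst : ∀ v ∈ V, ∀ x ∈ f v, kp x = v)
    (hdis : V.Pairwise (· ≠ ·)) :
    groupRuns kp (V.flatMap f) = V.map f := by
  induction V with
  | nil => simp [groupRuns]
  | cons v V' ih =>
      cases hfv : f v with
      | nil => exact absurd hfv (hne v (by simp))
      | cons x t =>
          have hkx : kp x = v := hconst v (by simp) x (by simp [hfv])
          have hkt : ∀ y ∈ t, (kp y == kp x) = true := by
            intro y hy
            simp [hkx, hconst v (by simp) y (by simp [hfv, hy])]
          rw [List.flatMap_cons, hfv, List.cons_append, groupRuns]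
          have htail : ((t ++ V'.flatMap f).takeWhile (fun y => kp y == kp x) = t)
              ∧ ((t ++ V'.flatMap f).dropWhile (fun y => kp y == kp x) = V'.flatMap f) := by
            rw [takeWhile_all_append _ t _ hkt, dropWhile_all_append _ t _ hkt]
            cases hV' : V' with
            | nil => simp
            | cons v' V'' =>
                rw [List.flatMap_cons]
                cases hfv' : f v' with
                | nil => exact absurd hfv' (hne v' (by simp [hV']))
                | cons z t' =>
                    have hkz : kp z = v' := hconst v' (by simp [hV']) z (by simp [hfv'])
                    have hvv : v ≠ v' := by
                      rw [List.pairwise_cons] at hdis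
                      exact hdis.1 v' (by simp [hV'])
                    have hq : (kp z == kp x) = false := by
                      simp [hkz, hkx]
                      omega
                    rw [List.cons_append, List.takeWhile_cons_of_neg (by simp [hq]),
                      List.dropWhile_cons_of_neg (by simp [hq])]
                    simp
          rw [htail.1, htail.2]
          rw [ih (fun w hw => hne w (by simp [hw])) (fun w hw => hconst w (by simp [hw]))
            (List.Pairwise.sublist (List.sublist_cons_self v V') hdis)]
          rw [List.map_cons, hfv]

-- ==== A-side characterisation (reused from the bucket loop) ====

-- A's defaultdict loop, looked up at any key, is the order-preserving filter of ids.
theorem buckets_getD (ids : List String) (ptsD : PySem.Dict String Int) (p : Int) :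
    (ids.foldl (fun d pid => d.modify (ptsD.getD pid 0) [] (fun b => b ++ [pid]))
        PySem.Dict.empty).getD p []
      = ids.filter (fun pid => ptsD.getD pid 0 == p) := by
  have h := PySem.Dict.getD_foldl_modify_append
      (ids.map (fun pid => (ptsD.getD pid 0, pid))) (PySem.Dict.empty (κ := Int) (ν := List String)) p
  rw [List.foldl_map] at h
  simpa [List.filter_map, Function.comp_def] using h

-- A's key list is exactly the set of points values of ids, in first-occurrence order.
theorem buckets_keys (ids : List String) (ptsD : PySem.Dict String Int) :
    (ids.foldl (fun d pid => d.modify (ptsD.getD pid 0) [] (fun b => b ++ [pid]))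
        PySem.Dict.empty).keys
      = PySem.Set.ofList (ids.map (fun pid => ptsD.getD pid 0)) := by
  rw [PySem.Dict.keys_foldl_modify_key ids (fun pid => ptsD.getD pid 0) []
        (fun _ pid => (fun b => b ++ [pid])) PySem.Dict.empty]
  simp [PySem.Set.update_nil_left]

-- B's whole pipeline, canonically: one bracket per distinct points value, descending
theorem alt_eq_canonical (kp kk : String → Int) (kn : String → String) (ids : List String) :
    groupRuns kp (PySem.List.sorted (PySem.List.sorted2 ids kk kn false) (fun pid => -(kp pid)) false)
      = (PySem.List.sorted (PySem.Set.ofList (ids.map kp)) (fun v => v) true).map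
          (fun p => PySem.List.sorted2 (ids.filter (fun x => kp x == p)) kk kn false) := by
  have hysmem : ∀ x, x ∈ PySem.List.sorted2 ids kk kn false ↔ x ∈ ids :=
    fun x => (PySem.List.sorted2_perm ids kk kn false).mem_iff
  have hvmem : ∀ v, v ∈ PySem.List.sorted (PySem.Set.ofList (ids.map kp)) (fun v => v) true ↔
      ∃ x ∈ ids, kp x = v := by
    intro v
    rw [PySem.List.mem_sorted, PySem.Set.mem_ofList, List.mem_map]
  have hgt : (PySem.List.sorted (PySem.Set.ofList (ids.map kp)) (fun v => v) true).Pairwise (· > ·) := by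
    have h1 := PySem.List.sorted_pairwise_rev (PySem.Set.ofList (ids.map kp)) (fun v => v)
    have h2 : (PySem.List.sorted (PySem.Set.ofList (ids.map kp)) (fun v => v) true).Nodup :=
      (PySem.List.sorted_perm (PySem.Set.ofList (ids.map kp)) (fun v => v) true).symm.nodup
        (PySem.Set.nodup_ofList (ids.map kp))
    exact (h1.and h2).imp (fun h => lt_of_le_of_ne h.1 (fun he => h.2 he.symm))
  have hcov : ∀ x ∈ PySem.List.sorted2 ids kk kn false,
      kp x ∈ PySem.List.sorted (PySem.Set.ofList (ids.map kp)) (fun v => v) true := by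
    intro x hx
    exact (hvmem (kp x)).mpr ⟨x, (hysmem x).mp hx, rfl⟩
  have hfil : ∀ p, (PySem.List.sorted2 ids kk kn false).filter (fun x => kp x == p)
      = PySem.List.sorted2 (ids.filter (fun x => kp x == p)) kk kn false := by
    intro p
    rw [sorted2_eq_sortB, sorted2_eq_sortB, filter_sortB _ _ _ (lt2_asym kk kn) (lt2_transB kk kn)]
  rw [sorted_eq_sortB,
    bucketize kp (PySem.List.sorted (PySem.Set.ofList (ids.map kp)) (fun v => v) true)
      (PySem.List.sorted2 ids kk kn false) hgt hcov]
  simp only [hfil]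
  rw [groupRuns_flatMap kp _ _ ?hne ?hconst (hgt.imp (fun h => ne_of_gt h))]
  case hne =>
    intro v hv
    rcases (hvmem v).mp hv with ⟨x, hx, rfl⟩
    intro h0
    have hp := PySem.List.sorted2_perm (ids.filter (fun y => kp y == kp x)) kk kn false
    rw [h0] at hp
    have h1 : ids.filter (fun y => kp y == kp x) = [] := hp.symm.eq_nil
    have hxmem : x ∈ ids.filter (fun y => kp y == kp x) := List.mem_filter.mpr ⟨hx, by simp⟩
    rw [h1] at hxmem
    simp at hxmem
  case hconst =>
    intro v hv x hx
    have := (PySem.List.sorted2_perm (ids.filter (fun y => kp y == v)) kk kn false).mem_iff.mp hx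
    simpa using (List.mem_filter.mp this).2

-- ===== VERDICT (by name: the statement is the Claim_ definition above) =====
theorem build_brackets_py_spec : Claim_equal_build_brackets_py := by
  intro ids pts_by_id kts_by_id id2name _ _
  unfold Spec_build_brackets_py build_brackets_py build_brackets_py_alt
  rw [PySem.List.foldl_append_singleton_eq_map, buckets_keys]
  simp only [List.nil_append]
  rw [alt_eq_canonical]
  refine List.map_congr_left (fun p _ => ?_)
  rw [buckets_getD]
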